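-- pv_equiv track=rewrite | github.com/rpowergso/anagrams | game.py | can_make_word
-- ===== SOURCE A (Python) =====
-- def can_make_word(word, available_letters):
--     available = [letter.upper() for letter in available_letters]
--     for letter in word.upper():
--         if letter in available:
--             available.remove(letter)
--         else:
--             return False
--     return True
-- ===== SOURCE B (Python) =====
-- def can_make_word(word, available_letters):
--     need = {}
--     for c in word.upper():
--         need[c] = need.get(c, 0) + 1
--     have = {}
--     for t in available_letters:
--         u = t.upper()
--         have[u] = have.get(u, 0) + 1
--     return all(have.get(c, 0) >= n for c, n in need.items())
-- ===== Notes on version B (the rewrite author's own statement) =====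
-- stated objective: faster
-- what changed: Replaced A's consume-loop (membership test plus list.remove per letter, early return) by building two frequency tables once and returning a single multiset-inclusion check, with no mutation or early exit.
import Mathlib
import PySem

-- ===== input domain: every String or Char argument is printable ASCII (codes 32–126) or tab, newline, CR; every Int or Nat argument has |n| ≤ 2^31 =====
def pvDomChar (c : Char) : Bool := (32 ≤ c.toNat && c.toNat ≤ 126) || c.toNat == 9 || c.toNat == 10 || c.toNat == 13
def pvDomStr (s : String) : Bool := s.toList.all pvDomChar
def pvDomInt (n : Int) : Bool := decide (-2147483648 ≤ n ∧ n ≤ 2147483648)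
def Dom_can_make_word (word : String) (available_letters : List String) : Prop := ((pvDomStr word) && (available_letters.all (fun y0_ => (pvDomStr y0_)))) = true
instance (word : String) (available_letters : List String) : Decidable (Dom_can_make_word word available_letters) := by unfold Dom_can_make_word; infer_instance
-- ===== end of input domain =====

-- B replaces A's consume-loop (membership + list.remove per letter) by two frequency tables and one inclusion check.
-- ===== PORT A =====
-- the for-loop of A: consume letters (as 1-char strings) from the mutable `available` list
def canMakeGo : List String → List String → Bool
  | [], _ => true
  | s :: ss, avail =>
    if avail.contains s then
      match PySem.List.remove? avail s with
      | some avail' => canMakeGo ss avail'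
      | none => false
    else false

def can_make_word (word : String) (available_letters : List String) : Bool :=
  canMakeGo ((PySem.Str.upper word).toList.map (fun c => String.ofList [c]))
            (available_letters.map (fun l => PySem.Str.upper l))

-- ===== PORT B =====
def can_make_word_alt (word : String) (available_letters : List String) : Bool :=
  let need : PySem.Dict String Int :=
    ((PySem.Str.upper word).toList.map (fun c => String.ofList [c])).foldl
      (fun d x => d.insert x (d.getD x 0 + 1)) PySem.Dict.empty
  let haveD : PySem.Dict String Int :=
    (available_letters.map (fun l => PySem.Str.upper l)).foldl
      (fun d x => d.insert x (d.getD x 0 + 1)) PySem.Dict.empty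
  need.items.all (fun kv => haveD.getD kv.1 0 ≥ kv.2)

-- ===== PRECONDITION & SPEC =====
def Spec_can_make_word (word : String) (available_letters : List String) (out : Bool) : Prop := out = can_make_word_alt word available_letters
instance (word : String) (available_letters : List String) (out : Bool) : Decidable (Spec_can_make_word word available_letters out) := by unfold Spec_can_make_word; infer_instance

-- ===== CLAIM (what is proved, stated in full; the proofs are below) =====
def Claim_equal_can_make_word : Prop := ∀ (word : String) (available_letters : List String), Dom_can_make_word word available_letters → Spec_can_make_word word available_letters (can_make_word word available_letters)

-- ===== LEMMAS AND PROOFS =====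

-- A's loop succeeds iff the letters form a sub-multiset of the available tokens
lemma canMakeGo_iff (ss : List String) : ∀ avail : List String,
    canMakeGo ss avail = true ↔ ∀ s, ss.count s ≤ avail.count s := by
  induction ss with
  | nil => intro avail; simp [canMakeGo]
  | cons x ss ih =>
    intro avail
    by_cases hx : x ∈ avail
    · have hc : avail.contains x = true := by simpa using hx
      have h1 : 0 < avail.count x := List.count_pos_iff.mpr hx
      have h2 : (avail.erase x).count x = avail.count x - 1 := List.count_erase_self ..
      rw [canMakeGo, if_pos hc, PySem.List.remove?_eq_some_erase avail x hx, ih]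
      constructor
      · intro h s
        have hs := h s
        by_cases hsx : s = x
        · subst hsx
          rw [List.count_cons_self]
          rw [h2] at hs
          omega
        · rw [List.count_cons_of_ne (Ne.symm hsx)]
          rw [List.count_erase_of_ne hsx] at hs
          exact hs
      · intro h s
        have hs := h s
        by_cases hsx : s = x
        · subst hsx
          rw [List.count_cons_self] at hs
          rw [h2]
          omega
        · rw [List.count_cons_of_ne (Ne.symm hsx)] at hs
          rw [List.count_erase_of_ne hsx]
          exact hs
    · have hc : ¬ (avail.contains x = true) := by simpa using hx
      rw [canMakeGo, if_neg hc]
      simp only [Bool.false_eq_true, false_iff]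
      intro h
      have hs := h x
      rw [List.count_cons_self, List.count_eq_zero.mpr hx] at hs
      omega

-- B equals the same sub-multiset test
lemma alt_iff (word : String) (available_letters : List String) :
    can_make_word_alt word available_letters = true ↔
    ∀ s, ((PySem.Str.upper word).toList.map (fun c => String.ofList [c])).count s ≤
         (available_letters.map (fun l => PySem.Str.upper l)).count s := by
  unfold can_make_word_alt
  simp only [PySem.Dict.foldl_insert_getD_add_one_eq_counter, PySem.Dict.items_counter,
    PySem.Dict.getD_counter, List.all_eq_true, List.mem_map, decide_eq_true_iff, ge_iff_le,
    forall_exists_index, and_imp]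
  constructor
  · intro h s
    by_cases hs : s ∈ (PySem.Str.upper word).toList.map (fun c => String.ofList [c])
    · have := h _ s ((PySem.Set.mem_ofList _ _).mpr hs) rfl
      simpa using this
    · rw [List.count_eq_zero.mpr hs]; exact Nat.zero_le _
  · intro h kv s hs hkv
    subst hkv
    simpa using h s

-- ===== VERDICT (by name: the statement is the Claim_ definition above) =====
theorem can_make_word_spec : Claim_equal_can_make_word := by
  intro word available_letters _
  unfold Spec_can_make_word can_make_word
  rw [Bool.eq_iff_iff, canMakeGo_iff, alt_iff]
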